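-- pv_equiv track=rewrite | github.com/gajulasaikumar/LeetCode | 2231-largest-number-after-digit-swaps-by-parity/2231-largest-number-after-digit-swaps-by-parity.py | largestInteger
-- ===== SOURCE A (Python) =====
-- def largestInteger(num: int) -> int:
--     a=list(str(num))
--     x=[]
--     y=[]
--     for i in a:
--         if int(i)%2==0:
--             x.append(i)
--         else:
--             y.append(i)
--     x.sort()
--     y.sort()
--     z=[]
--     for i in range(len(a)):
--         if int(a[i])%2==0:
--             z.append(x.pop())
--         else:
--             z.append(y.pop())
--     return int("".join(z))
-- ===== SOURCE B (Python) =====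
-- def largestInteger(num: int) -> int:
--     # Digit-frequency table consumed in place by two monotone descending value
--     # pointers (no per-parity lists, no sorting): walk the digits once, and at
--     # each position lower the matching-parity pointer to the largest digit value
--     # still in stock, emit it and decrement its count.
--     s = str(num)
--     cnt = [0] * 10
--     for c in s:
--         cnt[int(c)] += 1
--     pe, po = 8, 9  # descending pointers over even / odd digit values
--     out = []
--     for c in s:
--         if int(c) % 2 == 0:
--             while cnt[pe] == 0:
--                 pe -= 2
--             out.append(pe)
--             cnt[pe] -= 1
--         else:
--             while cnt[po] == 0:
--                 po -= 2
--             out.append(po)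
--             cnt[po] -= 1
--     return int("".join(map(str, out)))
-- ===== Notes on version B (the rewrite author's own statement) =====
-- stated objective: alternative
-- what changed: Replaces A's per-parity digit lists with comparison sorts and pop()-from-the-back by a digit-frequency table cnt[0..9] consumed in place during a single left-to-right walk: two monotone descending value pointers (evens 8..0, odds 9..1) each step down to the largest same-parity digit still counted, which is emitted and decremented; no parity lists are ever built or sorted.
import Mathlib
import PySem

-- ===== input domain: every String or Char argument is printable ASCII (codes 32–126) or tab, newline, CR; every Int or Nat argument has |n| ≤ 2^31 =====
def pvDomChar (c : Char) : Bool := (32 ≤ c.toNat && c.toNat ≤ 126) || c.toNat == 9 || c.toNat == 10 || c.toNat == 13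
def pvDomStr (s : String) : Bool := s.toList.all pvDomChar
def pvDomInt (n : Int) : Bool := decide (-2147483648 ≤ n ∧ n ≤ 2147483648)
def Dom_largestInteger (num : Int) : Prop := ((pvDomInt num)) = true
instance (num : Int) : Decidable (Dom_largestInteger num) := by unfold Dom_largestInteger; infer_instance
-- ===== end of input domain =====

-- B drops A's per-parity lists, comparison sorts and pop(): a digit-frequency table is
-- consumed in place by two monotone descending value pointers during one walk of the digits.

-- int(c) for a one-character string c; under Pre_ every character is a digit, so the
-- default -1 (Python: ValueError) is never reached.
def pvCI (c : Char) : Int := (PySem.Int.ofChars? [c]).getD (-1)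

-- the test 'int(c) % 2 == 0' both Pythons perform on each character
def pvEven (c : Char) : Bool := PySem.Int.mod (pvCI c) 2 == 0

-- ===== PORT A =====
def largestInteger (num : Int) : Int :=
  let a := PySem.Int.toChars num                         -- a = list(str(num))
  let xy := a.foldl (fun (s : List Char × List Char) i =>
      if pvEven i then (s.1 ++ [i], s.2) else (s.1, s.2 ++ [i])) ([], [])
  let x := PySem.List.sorted xy.1 (fun c => c)           -- x.sort()
  let y := PySem.List.sorted xy.2 (fun c => c)           -- y.sort()
  let st := (PySem.List.pyRange 0 (PySem.List.len a) 1).foldl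
      (fun (s : List Char × List Char × List Char) i =>
        if pvEven (PySem.List.pyGetD a i ' ') then
          match PySem.List.pop? s.1 with                 -- z.append(x.pop())
          | some (v, x') => (x', s.2.1, s.2.2 ++ [v])
          | none => s                                    -- IndexError: unreachable under Pre_
        else
          match PySem.List.pop? s.2.1 with               -- z.append(y.pop())
          | some (v, y') => (s.1, y', s.2.2 ++ [v])
          | none => s) (x, y, [])
  (PySem.Int.ofChars? st.2.2).getD 0                     -- int("".join(z)); ValueError unreachable under Pre_

-- ===== PORT B =====
-- 'while cnt[p] == 0: p -= 2': the pointer only ever visits the five values 8,6,4,2,0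
-- (resp. 9,7,5,3,1) before it must stop under Pre_, so fuel 5 makes the same loop total.
def pvScan (cnt : List Int) (p : Int) : Nat → Int
  | 0 => p
  | f + 1 => if PySem.List.pyGetD cnt p 0 == 0 then pvScan cnt (p - 2) f else p

-- one iteration of B's main loop; state = (pe, po, cnt, out)
def pvStepF (st : Int × Int × List Int × List Int) (c : Char) : Int × Int × List Int × List Int :=
  if pvEven c then
    let pe' := pvScan st.2.2.1 st.1 5                    -- while cnt[pe] == 0: pe -= 2
    (pe', st.2.1,
      PySem.List.pySetD st.2.2.1 pe' (PySem.List.pyGetD st.2.2.1 pe' 0 - 1),  -- cnt[pe] -= 1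
      st.2.2.2 ++ [pe'])                                  -- out.append(pe)
  else
    let po' := pvScan st.2.2.1 st.2.1 5                  -- while cnt[po] == 0: po -= 2
    (st.1, po',
      PySem.List.pySetD st.2.2.1 po' (PySem.List.pyGetD st.2.2.1 po' 0 - 1),  -- cnt[po] -= 1
      st.2.2.2 ++ [po'])                                  -- out.append(po)

def largestInteger_alt (num : Int) : Int :=
  let s := PySem.Int.toChars num                         -- s = str(num)
  let cnt := s.foldl (fun cnt c =>
      PySem.List.pySetD cnt (pvCI c) (PySem.List.pyGetD cnt (pvCI c) 0 + 1))
      (PySem.List.pyRepeat [(0 : Int)] 10)               -- cnt = [0]*10; cnt[int(c)] += 1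
  let st := s.foldl pvStepF (8, 9, cnt, [])              -- pe, po = 8, 9; for c in s: …
  (PySem.Int.ofChars? ((st.2.2.2.map PySem.Int.toChars).flatten)).getD 0  -- int("".join(map(str, out)))

-- ===== PRECONDITION & SPEC =====
-- A raises ValueError (int('-')) for every negative num; Pre_ excludes exactly those inputs.
def Pre_largestInteger (num : Int) : Prop := 0 ≤ num
instance (num : Int) : Decidable (Pre_largestInteger num) := by unfold Pre_largestInteger; infer_instance
def pvWitness_largestInteger : Int := (65875)

def Spec_largestInteger (num : Int) (out : Int) : Prop := out = largestInteger_alt num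
instance (num : Int) (out : Int) : Decidable (Spec_largestInteger num out) := by unfold Spec_largestInteger; infer_instance

-- ===== CLAIM (what is proved, stated in full; the proofs are below) =====
def Claim_equal_largestInteger : Prop := ∀ (num : Int), Dom_largestInteger num → Pre_largestInteger num → Spec_largestInteger num (largestInteger num)

-- ===== LEMMAS AND PROOFS =====
set_option maxRecDepth 4000

-- the ten digit characters
def pvDigits : List Char := ['0', '1', '2', '3', '4', '5', '6', '7', '8', '9']

-- the character of a digit value
def pvChr (d : Int) : Char := Char.ofNat (48 + d.toNat)

-- number of occurrences in l of the digit with value d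
def pvN (l : List Char) (d : Nat) : Nat := l.countP (fun c => pvCI c == (d : Int))

-- the even/odd digit characters of l in descending order
def pvEvC (l : List Char) : List Char :=
  List.replicate (pvN l 8) '8' ++ List.replicate (pvN l 6) '6' ++ List.replicate (pvN l 4) '4'
    ++ List.replicate (pvN l 2) '2' ++ List.replicate (pvN l 0) '0'
def pvOdC (l : List Char) : List Char :=
  List.replicate (pvN l 9) '9' ++ List.replicate (pvN l 7) '7' ++ List.replicate (pvN l 5) '5'
    ++ List.replicate (pvN l 3) '3' ++ List.replicate (pvN l 1) '1'

-- same sequences as digit values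
def pvEvI (l : List Char) : List Int :=
  List.replicate (pvN l 8) 8 ++ List.replicate (pvN l 6) 6 ++ List.replicate (pvN l 4) 4
    ++ List.replicate (pvN l 2) 2 ++ List.replicate (pvN l 0) 0
def pvOdI (l : List Char) : List Int :=
  List.replicate (pvN l 9) 9 ++ List.replicate (pvN l 7) 7 ++ List.replicate (pvN l 5) 5
    ++ List.replicate (pvN l 3) 3 ++ List.replicate (pvN l 1) 1

-- the common interleaving skeleton of both main loops: walk the digit string, at an even
-- character take the next element of ev, at an odd one the next element of od
def pvBuild {α : Type} [Inhabited α] : List Char → List α → List α → List α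
  | [], _, _ => []
  | c :: cs, ev, od =>
    if pvEven c then ev.headI :: pvBuild cs ev.tail od
    else od.headI :: pvBuild cs ev od.tail

-- the chain of values the pointer p visits in f loop steps: p, p-2, …
def pvChain (p : Int) : Nat → List Int
  | 0 => []
  | f + 1 => p :: pvChain (p - 2) f

-- the digit sequence induced by the count table along a value chain
def pvSeq (cnt : List Int) (vs : List Int) : List Int :=
  vs.flatMap (fun v => List.replicate (cnt.getD v.toNat 0).toNat v)

-- pointer invariant: p sits on a suffix of its full chain, everything above was scanned to 0
def pvInv (cnt : List Int) (p0 p : Int) : Prop :=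
  ∃ mid f, f ≤ 5 ∧ pvChain p0 5 = mid ++ pvChain p f ∧ ∀ v ∈ mid, cnt.getD v.toNat 0 = 0

theorem pvToDigitsCore_mem (f : Nat) : ∀ (n : Nat) (ds : List Char),
    (∀ c ∈ ds, c ∈ pvDigits) → ∀ c ∈ Nat.toDigitsCore 10 f n ds, c ∈ pvDigits := by
  induction f with
  | zero => intro n ds hds; simpa [Nat.toDigitsCore] using hds
  | succ f ih =>
    intro n ds hds
    have hmem : Nat.digitChar (n % 10) ∈ pvDigits := by
      have h10 : n % 10 < 10 := Nat.mod_lt _ (by omega)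
      set m := n % 10 with hm
      interval_cases m <;> decide
    have hds' : ∀ c ∈ Nat.digitChar (n % 10) :: ds, c ∈ pvDigits := by
      intro c hc
      rcases List.mem_cons.mp hc with h | h
      · exact h ▸ hmem
      · exact hds c h
    simp only [Nat.toDigitsCore]
    split
    · exact hds'
    · exact ih (n / 10) _ hds'

theorem pvToChars_digits (num : Int) (h : 0 ≤ num) :
    ∀ c ∈ PySem.Int.toChars num, c ∈ pvDigits := by
  have : ¬ num < 0 := by omega
  simp only [PySem.Int.toChars, this, if_false, Nat.toDigits]
  exact pvToDigitsCore_mem _ _ _ (by simp)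

theorem pvPartition (l : List Char) (x y : List Char) :
    l.foldl (fun (s : List Char × List Char) i =>
      if pvEven i then (s.1 ++ [i], s.2) else (s.1, s.2 ++ [i])) (x, y)
    = (x ++ l.filter pvEven, y ++ l.filter (fun c => !pvEven c)) := by
  induction l generalizing x y with
  | nil => simp
  | cons c cs ih => by_cases h : pvEven c <;> simp [h, ih]

theorem pvAloop (l : List Char) (ev od z : List Char)
    (he : ev.length = l.countP pvEven) (ho : od.length = l.countP (fun c => !pvEven c)) :
    l.foldl (fun (s : List Char × List Char × List Char) c =>
        if pvEven c then
          match PySem.List.pop? s.1 with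
          | some (v, x') => (x', s.2.1, s.2.2 ++ [v])
          | none => s
        else
          match PySem.List.pop? s.2.1 with
          | some (v, y') => (s.1, y', s.2.2 ++ [v])
          | none => s) (ev.reverse, od.reverse, z)
    = ([], [], z ++ pvBuild l ev od) := by
  induction l generalizing ev od z with
  | nil =>
    simp only [List.countP_nil] at he ho
    have : ev = [] := List.eq_nil_of_length_eq_zero he
    have : od = [] := List.eq_nil_of_length_eq_zero ho
    subst this; subst ‹ev = []›
    simp [pvBuild]
  | cons c cs ih =>
    by_cases h : pvEven c
    · simp only [List.countP_cons, h, if_pos] at he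
      cases ev with
      | nil => simp at he
      | cons e ev' =>
        simp only [List.foldl_cons, h, if_pos, List.reverse_cons, PySem.List.pop?_last]
        have he' : ev'.length = cs.countP pvEven := by simp at he; omega
        have ho' : od.length = cs.countP (fun c => !pvEven c) := by
          simpa [List.countP_cons, h] using ho
        rw [ih ev' od (z ++ [e]) he' ho']
        simp [pvBuild, h]
    · simp only [List.countP_cons, h] at ho
      cases od with
      | nil => simp [h] at ho
      | cons o od' =>
        simp only [List.foldl_cons, h, List.reverse_cons, PySem.List.pop?_last, Bool.false_eq_true, if_false]
        have ho' : od'.length = cs.countP (fun c => !pvEven c) := by simp [h] at ho; omega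
        have he' : ev.length = cs.countP pvEven := by simpa [List.countP_cons, h] using he
        rw [ih ev od' (z ++ [o]) he' ho']
        simp [pvBuild, h]

theorem pvBuild_map {α β : Type} [Inhabited α] [Inhabited β] (f : α → β) (l : List Char)
    (ev od : List α) (he : l.countP pvEven ≤ ev.length) (ho : l.countP (fun c => !pvEven c) ≤ od.length) :
    pvBuild l (ev.map f) (od.map f) = (pvBuild l ev od).map f := by
  induction l generalizing ev od with
  | nil => simp [pvBuild]
  | cons c cs ih =>
    by_cases h : pvEven c
    · cases ev with
      | nil => simp [List.countP_cons, h] at he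
      | cons e ev' =>
        simp only [pvBuild, h, if_pos, List.map_cons, List.headI, List.tail]
        rw [ih ev' od (by simp [List.countP_cons, h] at he; omega)
          (by simpa [List.countP_cons, h] using ho)]
    · cases od with
      | nil => simp [List.countP_cons, h] at ho
      | cons o od' =>
        simp only [pvBuild, h, Bool.false_eq_true, if_false, List.map_cons, List.headI, List.tail]
        rw [ih ev od' (by simpa [List.countP_cons, h] using he)
          (by simp [List.countP_cons, h] at ho; omega)]

theorem pvBuild_mem {α : Type} [Inhabited α] (l : List Char) (ev od : List α)
    (he : l.countP pvEven ≤ ev.length) (ho : l.countP (fun c => !pvEven c) ≤ od.length) :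
    ∀ x ∈ pvBuild l ev od, x ∈ ev ∨ x ∈ od := by
  induction l generalizing ev od with
  | nil => simp [pvBuild]
  | cons c cs ih =>
    by_cases h : pvEven c
    · cases ev with
      | nil => simp [List.countP_cons, h] at he
      | cons e ev' =>
        intro x hx
        simp only [pvBuild, h, if_pos, List.headI, List.tail, List.mem_cons] at hx
        rcases hx with rfl | hx
        · exact Or.inl (by simp)
        · rcases ih ev' od (by simp [List.countP_cons, h] at he; omega)
            (by simpa [List.countP_cons, h] using ho) x hx with h1 | h1
          · exact Or.inl (by simp [h1])
          · exact Or.inr h1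
    · cases od with
      | nil => simp [List.countP_cons, h] at ho
      | cons o od' =>
        intro x hx
        simp only [pvBuild, h, Bool.false_eq_true, if_false, List.headI, List.tail, List.mem_cons] at hx
        rcases hx with rfl | hx
        · exact Or.inr (by simp)
        · rcases ih ev od' (by simpa [List.countP_cons, h] using he)
            (by simp [List.countP_cons, h] at ho; omega) x hx with h1 | h1
          · exact Or.inl h1
          · exact Or.inr (by simp [h1])

theorem pvFlattenDigits (out : List Int) (h : ∀ x ∈ out, 0 ≤ x ∧ x < 10) :
    (out.map PySem.Int.toChars).flatten = out.map pvChr := by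
  induction out with
  | nil => simp
  | cons x xs ih =>
    have hx := h x (by simp)
    have hsing : PySem.Int.toChars x = [pvChr x] := by
      obtain ⟨h1, h2⟩ := hx
      interval_cases x <;> decide
    simp only [List.map_cons, List.flatten_cons, hsing]
    rw [ih (fun y hy => h y (by simp [hy]))]
    rfl

theorem pvCI_range (c : Char) (hc : c ∈ pvDigits) : 0 ≤ pvCI c ∧ pvCI c < 10 := by
  fin_cases hc <;> decide

theorem pvEven_digit (c : Char) (hc : c ∈ pvDigits) (h : pvEven c = true) :
    c ∈ (['8', '6', '4', '2', '0'] : List Char) := by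
  fin_cases hc <;> revert h <;> decide

theorem pvOdd_digit (c : Char) (hc : c ∈ pvDigits) (h : pvEven c = false) :
    c ∈ (['9', '7', '5', '3', '1'] : List Char) := by
  fin_cases hc <;> revert h <;> decide

theorem pvCount_eq (l : List Char) (hl : ∀ c ∈ l, c ∈ pvDigits) (d : Nat) (hd : d < 10) :
    l.count (pvChr d) = pvN l d := by
  unfold pvN List.count
  apply List.countP_congr
  intro c hc
  have := hl c hc
  interval_cases d <;> fin_cases this <;> decide

theorem pvSortE (l : List Char) (hl : ∀ c ∈ l, c ∈ pvDigits) :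
    PySem.List.sorted (l.filter pvEven) (fun c => c) = (pvEvC l).reverse := by
  apply PySem.List.sorted_id_eq_of_perm_of_pairwise
  · refine (List.reverse_perm _).trans ?_
    rw [List.perm_iff_count]
    intro a
    by_cases h : a ∈ (['8', '6', '4', '2', '0'] : List Char)
    · fin_cases h
      · rw [List.count_filter (by decide)]
        have h8 := pvCount_eq l hl 8 (by omega)
        simp only [pvEvC, List.count_append, List.count_replicate]
        simp only [show pvChr ((8 : Nat) : Int) = '8' from by decide] at h8
        simp [h8]
      · rw [List.count_filter (by decide)]
        have h6 := pvCount_eq l hl 6 (by omega)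
        simp only [show pvChr ((6 : Nat) : Int) = '6' from by decide] at h6
        simp [pvEvC, List.count_append, List.count_replicate, h6]
      · rw [List.count_filter (by decide)]
        have h4 := pvCount_eq l hl 4 (by omega)
        simp only [show pvChr ((4 : Nat) : Int) = '4' from by decide] at h4
        simp [pvEvC, List.count_append, List.count_replicate, h4]
      · rw [List.count_filter (by decide)]
        have h2 := pvCount_eq l hl 2 (by omega)
        simp only [show pvChr ((2 : Nat) : Int) = '2' from by decide] at h2
        simp [pvEvC, List.count_append, List.count_replicate, h2]
      · rw [List.count_filter (by decide)]
        have h0 := pvCount_eq l hl 0 (by omega)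
        simp only [show pvChr ((0 : Nat) : Int) = '0' from by decide] at h0
        simp [pvEvC, List.count_append, List.count_replicate, h0]
    · have hz : List.count a (List.filter pvEven l) = 0 := by
        rw [List.count_eq_zero]
        intro hmem
        rcases List.mem_filter.mp hmem with ⟨hm, hp⟩
        exact h (pvEven_digit a (hl a hm) hp)
      rw [hz]
      simp only [pvEvC, List.count_append, List.count_replicate]
      simp at h
      have n8 : ¬('8' = a) := fun hh => h.1 hh.symm
      have n6 : ¬('6' = a) := fun hh => h.2.1 hh.symm
      have n4 : ¬('4' = a) := fun hh => h.2.2.1 hh.symm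
      have n2 : ¬('2' = a) := fun hh => h.2.2.2.1 hh.symm
      have n0 : ¬('0' = a) := fun hh => h.2.2.2.2 hh.symm
      simp [n8, n6, n4, n2, n0]
  · rw [List.pairwise_reverse]
    unfold pvEvC
    simp only [List.pairwise_append, List.mem_append, List.mem_replicate]
    simp
    refine ⟨⟨fun a ha _ => ?_, fun a ha _ => ?_⟩, fun a ha _ => ?_⟩
    · rcases ha with ⟨-, rfl⟩ | ⟨-, rfl⟩ <;> decide
    · rcases ha with (⟨-, rfl⟩ | ⟨-, rfl⟩) | ⟨-, rfl⟩ <;> decide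
    · rcases ha with ((⟨-, rfl⟩ | ⟨-, rfl⟩) | ⟨-, rfl⟩) | ⟨-, rfl⟩ <;> decide

theorem pvSortO (l : List Char) (hl : ∀ c ∈ l, c ∈ pvDigits) :
    PySem.List.sorted (l.filter (fun c => !pvEven c)) (fun c => c) = (pvOdC l).reverse := by
  apply PySem.List.sorted_id_eq_of_perm_of_pairwise
  · refine (List.reverse_perm _).trans ?_
    rw [List.perm_iff_count]
    intro a
    by_cases h : a ∈ (['9', '7', '5', '3', '1'] : List Char)
    · fin_cases h
      · rw [List.count_filter (by decide)]
        have h9 := pvCount_eq l hl 9 (by omega)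
        simp only [show pvChr ((9 : Nat) : Int) = '9' from by decide] at h9
        simp [pvOdC, List.count_append, List.count_replicate, h9]
      · rw [List.count_filter (by decide)]
        have h7 := pvCount_eq l hl 7 (by omega)
        simp only [show pvChr ((7 : Nat) : Int) = '7' from by decide] at h7
        simp [pvOdC, List.count_append, List.count_replicate, h7]
      · rw [List.count_filter (by decide)]
        have h5 := pvCount_eq l hl 5 (by omega)
        simp only [show pvChr ((5 : Nat) : Int) = '5' from by decide] at h5
        simp [pvOdC, List.count_append, List.count_replicate, h5]
      · rw [List.count_filter (by decide)]
        have h3 := pvCount_eq l hl 3 (by omega)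
        simp only [show pvChr ((3 : Nat) : Int) = '3' from by decide] at h3
        simp [pvOdC, List.count_append, List.count_replicate, h3]
      · rw [List.count_filter (by decide)]
        have h1 := pvCount_eq l hl 1 (by omega)
        simp only [show pvChr ((1 : Nat) : Int) = '1' from by decide] at h1
        simp [pvOdC, List.count_append, List.count_replicate, h1]
    · have hz : List.count a (List.filter (fun c => !pvEven c) l) = 0 := by
        rw [List.count_eq_zero]
        intro hmem
        rcases List.mem_filter.mp hmem with ⟨hm, hp⟩
        exact h (pvOdd_digit a (hl a hm) (by simpa using hp))
      rw [hz]
      simp only [pvOdC, List.count_append, List.count_replicate]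
      simp at h
      have n9 : ¬('9' = a) := fun hh => h.1 hh.symm
      have n7 : ¬('7' = a) := fun hh => h.2.1 hh.symm
      have n5 : ¬('5' = a) := fun hh => h.2.2.1 hh.symm
      have n3 : ¬('3' = a) := fun hh => h.2.2.2.1 hh.symm
      have n1 : ¬('1' = a) := fun hh => h.2.2.2.2 hh.symm
      simp [n9, n7, n5, n3, n1]
  · rw [List.pairwise_reverse]
    unfold pvOdC
    simp only [List.pairwise_append, List.mem_append, List.mem_replicate]
    simp
    refine ⟨⟨fun a ha _ => ?_, fun a ha _ => ?_⟩, fun a ha _ => ?_⟩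
    · rcases ha with ⟨-, rfl⟩ | ⟨-, rfl⟩ <;> decide
    · rcases ha with (⟨-, rfl⟩ | ⟨-, rfl⟩) | ⟨-, rfl⟩ <;> decide
    · rcases ha with ((⟨-, rfl⟩ | ⟨-, rfl⟩) | ⟨-, rfl⟩) | ⟨-, rfl⟩ <;> decide

theorem pvCntFold (l : List Char) (hl : ∀ c ∈ l, c ∈ pvDigits) (cnt0 : List Int) (h0 : cnt0.length = 10) :
    ((l.foldl (fun cnt c =>
        PySem.List.pySetD cnt (pvCI c) (PySem.List.pyGetD cnt (pvCI c) 0 + 1)) cnt0).length = 10)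
    ∧ ∀ d : Nat, d < 10 →
      PySem.List.pyGetD (l.foldl (fun cnt c =>
        PySem.List.pySetD cnt (pvCI c) (PySem.List.pyGetD cnt (pvCI c) 0 + 1)) cnt0) (d : Int) 0
        = PySem.List.pyGetD cnt0 (d : Int) 0 + (l.countP (fun c => pvCI c == (d : Int)) : Int) := by
  induction l generalizing cnt0 with
  | nil => simp [h0]
  | cons c cs ih =>
    obtain ⟨hge, hlt⟩ := pvCI_range c (hl c (by simp))
    have hset : PySem.List.pySetD cnt0 (pvCI c) (PySem.List.pyGetD cnt0 (pvCI c) 0 + 1)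
        = cnt0.set (pvCI c).toNat (PySem.List.pyGetD cnt0 (pvCI c) 0 + 1) :=
      PySem.List.pySetD_of_nonneg _ _ hge
    have h1 : (cnt0.set (pvCI c).toNat (PySem.List.pyGetD cnt0 (pvCI c) 0 + 1)).length = 10 := by
      simp [h0]
    obtain ⟨ihlen, ihget⟩ := ih (fun x hx => hl x (by simp [hx])) _ h1
    simp only [List.foldl_cons, hset]
    refine ⟨ihlen, fun d hd => ?_⟩
    rw [ihget d hd]
    rw [List.countP_cons]
    by_cases hEq : (pvCI c).toNat = d
    · have hce : pvCI c = (d : Int) := by omega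
      have hb : (pvCI c == (d : Int)) = true := by simp [hce]
      have hg : PySem.List.pyGetD (cnt0.set (pvCI c).toNat (PySem.List.pyGetD cnt0 (pvCI c) 0 + 1)) ((d : Nat) : Int) 0
          = PySem.List.pyGetD cnt0 (pvCI c) 0 + 1 := by
        simp only [PySem.List.pyGetD_natCast]
        rw [List.getD, List.getElem?_set]
        simp [hEq, show (d : Nat) < cnt0.length by omega]
      rw [hg, hb, hce]
      simp
      omega
    · have hb : (pvCI c == (d : Int)) = false := by simp; omega
      have hg : PySem.List.pyGetD (cnt0.set (pvCI c).toNat (PySem.List.pyGetD cnt0 (pvCI c) 0 + 1)) ((d : Nat) : Int) 0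
          = PySem.List.pyGetD cnt0 ((d : Nat) : Int) 0 := by
        simp only [PySem.List.pyGetD_natCast]
        rw [List.getD, List.getD, List.getElem?_set]
        simp [hEq]
      rw [hg, hb]
      simp

-- ----- chain / scan infrastructure for B's pointer loop -----

theorem pvChain_length (f : Nat) : ∀ p, (pvChain p f).length = f := by
  induction f with
  | zero => intro p; simp [pvChain]
  | succ f ih => intro p; simp [pvChain, ih]

theorem pvChain_mem (f : Nat) : ∀ p v, v ∈ pvChain p f → ∃ i : Nat, i < f ∧ v = p - 2 * i := by
  induction f with
  | zero => intro p v h; simp [pvChain] at h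
  | succ f ih =>
    intro p v h
    simp only [pvChain, List.mem_cons] at h
    rcases h with rfl | h
    · exact ⟨0, by omega, by simp⟩
    · obtain ⟨i, hi, rfl⟩ := ih (p - 2) v h
      exact ⟨i + 1, by omega, by push_cast; omega⟩

theorem pvChain_append (a b : Nat) : ∀ p, pvChain p (a + b) = pvChain p a ++ pvChain (p - 2 * a) b := by
  induction a with
  | zero => intro p; simp [pvChain]
  | succ a ih =>
    intro p
    have : a + 1 + b = (a + b) + 1 := by omega
    rw [this]
    simp only [pvChain, List.cons_append]
    rw [ih (p - 2)]
    have h2 : p - 2 - 2 * (a : Int) = p - 2 * ((a + 1 : Nat) : Int) := by push_cast; omega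
    rw [h2]

theorem pvChain_decomp (n : Nat) : ∀ (p0 p : Int) (mid : List Int) (f : Nat),
    pvChain p0 n = mid ++ pvChain p f → 0 < f → f ≤ n ∧ p = p0 - 2 * ((n : Int) - f) := by
  induction n with
  | zero =>
    intro p0 p mid f h hf
    have := congrArg List.length h
    simp [pvChain_length] at this
    omega
  | succ n ih =>
    intro p0 p mid f h hf
    cases mid with
    | nil =>
      simp only [List.nil_append] at h
      have hl := congrArg List.length h
      simp [pvChain_length] at hl
      subst hl
      simp only [pvChain, List.cons.injEq] at h
      exact ⟨le_refl _, by omega⟩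
    | cons m mid' =>
      simp only [pvChain, List.cons_append, List.cons.injEq] at h
      obtain ⟨h1, h2⟩ := ih (p0 - 2) p mid' f h.2 hf
      exact ⟨by omega, by push_cast at h2 ⊢; omega⟩

-- pyGetD with a nonnegative in-range index is getD
theorem pvPyGetD (cnt : List Int) (p : Int) (hp : 0 ≤ p) :
    PySem.List.pyGetD cnt p 0 = cnt.getD p.toNat 0 := by
  have h : p = ((p.toNat : Nat) : Int) := by omega
  conv_lhs => rw [h]
  rw [PySem.List.pyGetD_natCast]

theorem pvGetD_set (xs : List Int) (a k : Nat) (w : Int) (ha : a < xs.length) :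
    (xs.set a w).getD k 0 = if k = a then w else xs.getD k 0 := by
  rw [List.getD, List.getD, List.getElem?_set]
  by_cases h : a = k
  · subst h; simp [ha]
  · have h' : ¬ k = a := fun hh => h hh.symm
    simp [h, h']

-- scanning with more fuel gives the same answer once a nonzero count lies on the chain
theorem pvScan_mono (f : Nat) : ∀ (g : Nat) (p : Int) (cnt : List Int), f ≤ g →
    (∃ v ∈ pvChain p f, cnt.getD v.toNat 0 ≠ 0) → 0 ≤ p - 2 * f + 2 →
    pvScan cnt p g = pvScan cnt p f := by
  induction f with
  | zero => intro g p cnt _ h _; simp [pvChain] at h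
  | succ f ih =>
    intro g p cnt hg h hp
    obtain ⟨g', rfl⟩ : ∃ g', g = g' + 1 := ⟨g - 1, by omega⟩
    have hp0 : 0 ≤ p := by push_cast at hp; omega
    rw [pvScan, pvScan, pvPyGetD cnt p hp0]
    by_cases hc : cnt.getD p.toNat 0 = 0
    · simp only [hc, beq_self_eq_true, if_true]
      obtain ⟨v, hv, hnz⟩ := h
      simp only [pvChain, List.mem_cons] at hv
      rcases hv with rfl | hv
      · exact absurd hc hnz
      · exact ih g' (p - 2) cnt (by omega) ⟨v, hv, hnz⟩ (by push_cast at hp ⊢; omega)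
    · rw [List.getD] at hc
      simp [hc]

-- the core scan lemma: the pointer lands on the first chain value with a nonzero count
theorem pvScanCore (f : Nat) : ∀ (p : Int) (cnt : List Int),
    (∀ k : Nat, 0 ≤ cnt.getD k 0) → 0 ≤ p - 2 * f + 2 →
    pvSeq cnt (pvChain p f) ≠ [] →
    ∃ g : Nat, ∃ mid : List Int, 0 < g ∧ g ≤ f ∧
      pvChain p f = mid ++ pvChain (pvScan cnt p f) g ∧
      (∀ v ∈ mid, cnt.getD v.toNat 0 = 0) ∧
      cnt.getD (pvScan cnt p f).toNat 0 ≠ 0 := by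
  induction f with
  | zero => intro p cnt _ _ hne; simp [pvChain, pvSeq] at hne
  | succ f ih =>
    intro p cnt hnn hp hne
    have hp0 : 0 ≤ p := by push_cast at hp; omega
    by_cases hc : cnt.getD p.toNat 0 = 0
    · have hscan : pvScan cnt p (f + 1) = pvScan cnt (p - 2) f := by
        rw [pvScan, pvPyGetD cnt p hp0, if_pos (by simpa [List.getD] using hc)]
      have hne' : pvSeq cnt (pvChain (p - 2) f) ≠ [] := by
        intro h
        apply hne
        simp only [pvSeq, pvChain, List.flatMap_cons, hc, Int.toNat_zero,
          List.replicate_zero, List.nil_append]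
        simpa [pvSeq] using h
      obtain ⟨g, mid, hg0, hgf, heq, hmid, hnz⟩ :=
        ih (p - 2) cnt hnn (by push_cast at hp ⊢; omega) hne'
      refine ⟨g, p :: mid, hg0, by omega, ?_, ?_, ?_⟩
      · rw [hscan]; simp [pvChain, heq]
      · intro v hv
        rcases List.mem_cons.mp hv with rfl | hv
        · exact hc
        · exact hmid v hv
      · rw [hscan]; exact hnz
    · have hscan : pvScan cnt p (f + 1) = p := by
        rw [pvScan, pvPyGetD cnt p hp0, if_neg (by simpa [List.getD] using hc)]
      exact ⟨f + 1, [], by omega, le_refl _, by rw [hscan]; simp, by simp, by rw [hscan]; exact hc⟩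

-- pvSeq ignores chain values whose counts are zero
theorem pvSeq_append (cnt : List Int) (a b : List Int) :
    pvSeq cnt (a ++ b) = pvSeq cnt a ++ pvSeq cnt b := by
  simp [pvSeq]

theorem pvSeq_zero (cnt : List Int) (mid : List Int) (h : ∀ v ∈ mid, cnt.getD v.toNat 0 = 0) :
    pvSeq cnt mid = [] := by
  induction mid with
  | nil => simp [pvSeq]
  | cons v vs ih =>
    simp only [pvSeq, List.flatMap_cons]
    rw [h v (by simp)]
    simp only [Int.toNat_zero, List.replicate_zero, List.nil_append]
    exact ih (fun w hw => h w (by simp [hw]))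

theorem pvSeq_congr (c1 c2 : List Int) (vs : List Int)
    (h : ∀ v ∈ vs, c1.getD v.toNat 0 = c2.getD v.toNat 0) : pvSeq c1 vs = pvSeq c2 vs := by
  induction vs with
  | nil => rfl
  | cons v vs ih =>
    simp only [pvSeq, List.flatMap_cons]
    rw [h v (by simp)]
    have := ih (fun w hw => h w (by simp [hw]))
    simp only [pvSeq] at this
    rw [this]

-- one even/odd step of B's loop, stated generically over the start pointer p0 ∈ {8, 9}
theorem pvStepLemma (cnt : List Int) (p0 p : Int)
    (h10 : cnt.length = 10) (hnn : ∀ k : Nat, 0 ≤ cnt.getD k 0)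
    (hp0 : p0 = 8 ∨ p0 = 9)
    (hinv : pvInv cnt p0 p)
    (hne : pvSeq cnt (pvChain p0 5) ≠ []) :
    pvScan cnt p 5 = (pvSeq cnt (pvChain p0 5)).headI ∧
    (PySem.List.pySetD cnt (pvScan cnt p 5)
        (PySem.List.pyGetD cnt (pvScan cnt p 5) 0 - 1)).length = 10 ∧
    (∀ k : Nat, 0 ≤ (PySem.List.pySetD cnt (pvScan cnt p 5)
        (PySem.List.pyGetD cnt (pvScan cnt p 5) 0 - 1)).getD k 0) ∧
    pvInv (PySem.List.pySetD cnt (pvScan cnt p 5)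
        (PySem.List.pyGetD cnt (pvScan cnt p 5) 0 - 1)) p0 (pvScan cnt p 5) ∧
    pvSeq (PySem.List.pySetD cnt (pvScan cnt p 5)
        (PySem.List.pyGetD cnt (pvScan cnt p 5) 0 - 1)) (pvChain p0 5)
      = (pvSeq cnt (pvChain p0 5)).tail ∧
    pvSeq (PySem.List.pySetD cnt (pvScan cnt p 5)
        (PySem.List.pyGetD cnt (pvScan cnt p 5) 0 - 1)) (pvChain (17 - p0) 5)
      = pvSeq cnt (pvChain (17 - p0) 5) ∧
    (∀ q, pvInv cnt (17 - p0) q → pvInv (PySem.List.pySetD cnt (pvScan cnt p 5)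
        (PySem.List.pyGetD cnt (pvScan cnt p 5) 0 - 1)) (17 - p0) q) := by
  obtain ⟨mid, f, hf5, hchain, hmid⟩ := hinv
  rcases Nat.eq_zero_or_pos f with rfl | hfpos
  · exfalso
    apply hne
    rw [show pvChain p 0 = [] from rfl, List.append_nil] at hchain
    rw [hchain]
    exact pvSeq_zero cnt mid hmid
  obtain ⟨-, hpval⟩ := pvChain_decomp 5 p0 p mid f hchain hfpos
  have hpf : (0:Int) ≤ p - 2 * f + 2 := by rcases hp0 with rfl | rfl <;> omega
  have hSeqEq : pvSeq cnt (pvChain p0 5) = pvSeq cnt (pvChain p f) := by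
    rw [hchain, pvSeq_append, pvSeq_zero cnt mid hmid, List.nil_append]
  have hne' : pvSeq cnt (pvChain p f) ≠ [] := by rw [← hSeqEq]; exact hne
  obtain ⟨g, mid2, hg0, hgf, heq2, hmid2, hnz⟩ := pvScanCore f p cnt hnn hpf hne'
  have hmem : pvScan cnt p f ∈ pvChain p f := by
    rw [heq2]
    obtain ⟨g1, rfl⟩ : ∃ g1, g = g1 + 1 := ⟨g - 1, by omega⟩
    simp [pvChain]
  have hmono : pvScan cnt p 5 = pvScan cnt p f :=
    pvScan_mono f 5 p cnt hf5 ⟨_, hmem, hnz⟩ hpf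
  rw [hmono]
  set h := pvScan cnt p f with hh
  have hchain5 : pvChain p0 5 = (mid ++ mid2) ++ pvChain h g := by
    rw [hchain, heq2, List.append_assoc]
  obtain ⟨hg5, hhval⟩ := pvChain_decomp 5 p0 h (mid ++ mid2) g hchain5 hg0
  have hhge : 0 ≤ h := by rcases hp0 with rfl | rfl <;> omega
  have hhlt : h < 10 := by rcases hp0 with rfl | rfl <;> omega
  have happ : pvChain p0 5 = pvChain p0 (5 - g) ++ pvChain h g := by
    have h5 : (5 : Nat) = (5 - g) + g := by omega
    conv_lhs => rw [h5]
    rw [pvChain_append]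
    congr 2
    have : (((5 - g : Nat)) : Int) = 5 - (g : Int) := by omega
    rw [this]
    omega
  have hfront : mid ++ mid2 = pvChain p0 (5 - g) :=
    List.append_cancel_right (hchain5.symm.trans happ)
  have hfrontzero : ∀ v ∈ pvChain p0 (5 - g), cnt.getD v.toNat 0 = 0 := by
    intro v hv
    rw [← hfront] at hv
    rcases List.mem_append.mp hv with hv | hv
    · exact hmid v hv
    · exact hmid2 v hv
  have hdiff : ∀ v ∈ pvChain p0 (5 - g), v.toNat ≠ h.toNat := by
    intro v hv
    obtain ⟨i, hi, rfl⟩ := pvChain_mem _ _ _ hv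
    have : (g : Int) ≤ 5 := by omega
    omega
  have hset : PySem.List.pySetD cnt h (PySem.List.pyGetD cnt h 0 - 1)
      = cnt.set h.toNat (cnt.getD h.toNat 0 - 1) := by
    rw [PySem.List.pySetD_of_nonneg _ _ hhge, pvPyGetD cnt h hhge]
  have hhnat : h.toNat < cnt.length := by omega
  have hget' : ∀ k : Nat, (cnt.set h.toNat (cnt.getD h.toNat 0 - 1)).getD k 0
      = if k = h.toNat then cnt.getD h.toNat 0 - 1 else cnt.getD k 0 :=
    fun k => pvGetD_set cnt h.toNat k _ hhnat
  have hpos : 0 < cnt.getD h.toNat 0 := lt_of_le_of_ne (hnn _) (Ne.symm hnz)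
  obtain ⟨g', rfl⟩ : ∃ g', g = g' + 1 := ⟨g - 1, by omega⟩
  have hdiff2 : ∀ v ∈ pvChain (h - 2) g', v.toNat ≠ h.toNat := by
    intro v hv
    obtain ⟨i, hi, rfl⟩ := pvChain_mem _ _ _ hv
    have : (g' : Int) + 1 ≤ 5 := by exact_mod_cast Int.ofNat_le.mpr hg5
    omega
  have hseqhg : ∀ c : List Int, pvSeq c (pvChain h (g' + 1))
      = List.replicate (c.getD h.toNat 0).toNat h ++ pvSeq c (pvChain (h - 2) g') := by
    intro c
    simp [pvSeq, pvChain, List.flatMap_cons]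
  have hseqfull : pvSeq cnt (pvChain p0 5)
      = List.replicate (cnt.getD h.toNat 0).toNat h ++ pvSeq cnt (pvChain (h - 2) g') := by
    rw [happ, pvSeq_append, pvSeq_zero cnt _ hfrontzero, List.nil_append, hseqhg]
  have hrestEq : pvSeq (cnt.set h.toNat (cnt.getD h.toNat 0 - 1)) (pvChain (h - 2) g')
      = pvSeq cnt (pvChain (h - 2) g') := by
    apply pvSeq_congr
    intro v hv
    rw [hget', if_neg (hdiff2 v hv)]
  obtain ⟨m, hm⟩ : ∃ m, (cnt.getD h.toNat 0).toNat = m + 1 := ⟨(cnt.getD h.toNat 0).toNat - 1, by omega⟩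
  refine ⟨?_, ?_, ?_, ?_, ?_, ?_, ?_⟩
  · rw [hseqfull, hm]
    simp [List.replicate_succ]
  · rw [hset]; simp [h10]
  · intro k
    rw [hset, hget' k]
    split_ifs with hk
    · omega
    · exact hnn k
  · refine ⟨pvChain p0 (5 - (g' + 1)), g' + 1, hg5, happ, ?_⟩
    intro v hv
    rw [hset, hget', if_neg (hdiff v hv)]
    exact hfrontzero v hv
  · rw [hset]
    have hL : pvSeq (cnt.set h.toNat (cnt.getD h.toNat 0 - 1)) (pvChain p0 5)
        = List.replicate m h ++ pvSeq cnt (pvChain (h - 2) g') := by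
      rw [happ, pvSeq_append, pvSeq_zero _ _ (fun v hv => by
          rw [hget', if_neg (hdiff v hv)]; exact hfrontzero v hv),
        List.nil_append, hseqhg, hget', if_pos rfl, hrestEq]
      congr 2
      omega
    rw [hL, hseqfull, hm]
    simp [List.replicate_succ]
  · rw [hset]
    apply pvSeq_congr
    intro v hv
    obtain ⟨i, hi, rfl⟩ := pvChain_mem _ _ _ hv
    rw [hget', if_neg ?_]
    have : (g' : Int) + 1 ≤ 5 := by exact_mod_cast Int.ofNat_le.mpr hg5
    rcases hp0 with rfl | rfl <;> omega
  · rintro q ⟨midq, fq, hq5, hqchain, hqmid⟩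
    refine ⟨midq, fq, hq5, hqchain, ?_⟩
    intro v hv
    have hvmem : v ∈ pvChain (17 - p0) 5 := by rw [hqchain]; exact List.mem_append_left _ hv
    obtain ⟨i, hi, hvv⟩ := pvChain_mem _ _ _ hvmem
    rw [hset, hget', if_neg ?_]
    · exact hqmid v hv
    · have : (g' : Int) + 1 ≤ 5 := by exact_mod_cast Int.ofNat_le.mpr hg5
      rcases hp0 with rfl | rfl <;> omega

-- B's main loop produces pvBuild of the two count-induced sequences
theorem pvMainLoop (l : List Char) : ∀ (cnt : List Int) (pe po : Int) (z : List Int),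
    cnt.length = 10 → (∀ k : Nat, 0 ≤ cnt.getD k 0) →
    pvInv cnt 8 pe → pvInv cnt 9 po →
    l.countP pvEven ≤ (pvSeq cnt (pvChain 8 5)).length →
    l.countP (fun c => !pvEven c) ≤ (pvSeq cnt (pvChain 9 5)).length →
    (l.foldl pvStepF (pe, po, cnt, z)).2.2.2
      = z ++ pvBuild l (pvSeq cnt (pvChain 8 5)) (pvSeq cnt (pvChain 9 5)) := by
  induction l with
  | nil => intro cnt pe po z _ _ _ _ _ _; simp [pvBuild]
  | cons c cs ih =>
    intro cnt pe po z h10 hnn hie hio hbe hbo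
    rw [List.countP_cons] at hbe hbo
    by_cases hc : pvEven c
    · rw [if_pos hc] at hbe
      rw [if_neg (by simp [hc])] at hbo
      have hne : pvSeq cnt (pvChain 8 5) ≠ [] := by
        intro hnil; rw [hnil] at hbe; simp at hbe
      obtain ⟨hhead, hlen', hnn', hinv', htail, hother, hinvO⟩ :=
        pvStepLemma cnt 8 pe h10 hnn (Or.inl rfl) hie hne
      have h17 : (17 - 8 : Int) = 9 := by norm_num
      rw [h17] at hother hinvO
      simp only [List.foldl_cons, pvStepF, hc, if_pos]
      rw [ih _ _ _ _ hlen' hnn' hinv' (hinvO po hio)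
        (by rw [htail, List.length_tail]; omega)
        (by rw [hother]; omega)]
      rw [htail, hother]
      have hbuild : pvBuild (c :: cs) (pvSeq cnt (pvChain 8 5)) (pvSeq cnt (pvChain 9 5))
          = (pvSeq cnt (pvChain 8 5)).headI
            :: pvBuild cs (pvSeq cnt (pvChain 8 5)).tail (pvSeq cnt (pvChain 9 5)) := by
        rw [pvBuild, if_pos hc]
      rw [hbuild, hhead]
      simp
    · rw [if_neg hc] at hbe
      rw [if_pos (by simp [hc])] at hbo
      have hne : pvSeq cnt (pvChain 9 5) ≠ [] := by
        intro hnil; rw [hnil] at hbo; simp at hbo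
      obtain ⟨hhead, hlen', hnn', hinv', htail, hother, hinvO⟩ :=
        pvStepLemma cnt 9 po h10 hnn (Or.inr rfl) hio hne
      have h17 : (17 - 9 : Int) = 8 := by norm_num
      rw [h17] at hother hinvO
      simp only [List.foldl_cons, pvStepF, hc, Bool.false_eq_true, if_false]
      rw [ih _ _ _ _ hlen' hnn' (hinvO pe hie) hinv'
        (by rw [hother]; omega)
        (by rw [htail, List.length_tail]; omega)]
      rw [htail, hother]
      have hbuild : pvBuild (c :: cs) (pvSeq cnt (pvChain 8 5)) (pvSeq cnt (pvChain 9 5))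
          = (pvSeq cnt (pvChain 9 5)).headI
            :: pvBuild cs (pvSeq cnt (pvChain 8 5)) (pvSeq cnt (pvChain 9 5)).tail := by
        rw [pvBuild, if_neg (by simp [hc])]
      rw [hbuild, hhead]
      simp

-- ===== VERDICT (by name: the statement is the Claim_ definition above) =====
theorem largestInteger_spec : Claim_equal_largestInteger := by
  intro num _ hpre
  unfold Spec_largestInteger
  have hl := pvToChars_digits num hpre
  have hES := pvSortE _ hl
  have hOS := pvSortO _ hl
  have hEvLen : (pvEvC (PySem.Int.toChars num)).length = (PySem.Int.toChars num).countP pvEven := by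
    have h1 := congrArg List.length hES
    simp only [PySem.List.length_sorted, List.length_reverse] at h1
    rw [List.countP_eq_length_filter]
    omega
  have hOdLen : (pvOdC (PySem.Int.toChars num)).length
      = (PySem.Int.toChars num).countP (fun c => !pvEven c) := by
    have h1 := congrArg List.length hOS
    simp only [PySem.List.length_sorted, List.length_reverse] at h1
    rw [List.countP_eq_length_filter]
    omega
  -- ----- A side -----
  have hA : largestInteger num
      = (PySem.Int.ofChars? (pvBuild (PySem.Int.toChars num)
          (pvEvC (PySem.Int.toChars num)) (pvOdC (PySem.Int.toChars num)))).getD 0 := by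
    simp only [largestInteger]
    rw [pvPartition]
    rw [PySem.List.foldl_pyRange_pyGetD (PySem.Int.toChars num) ' '
      (fun (s : List Char × List Char × List Char) c =>
        if pvEven c then
          match PySem.List.pop? s.1 with
          | some (v, x') => (x', s.2.1, s.2.2 ++ [v])
          | none => s
        else
          match PySem.List.pop? s.2.1 with
          | some (v, y') => (s.1, y', s.2.2 ++ [v])
          | none => s) _ (le_refl 0)]
    simp only [List.nil_append, Int.toNat_zero, List.drop_zero]
    rw [hES, hOS]
    rw [show (pvEvC (PySem.Int.toChars num)).reverse
        = ((pvEvC (PySem.Int.toChars num)).reverse.reverse).reverse by simp,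
      show (pvOdC (PySem.Int.toChars num)).reverse
        = ((pvOdC (PySem.Int.toChars num)).reverse.reverse).reverse by simp]
    rw [pvAloop _ _ _ _ (by simpa using hEvLen) (by simpa using hOdLen)]
    simp
  -- ----- B side -----
  have hiE : (PySem.Int.toChars num).countP pvEven ≤ (pvEvI (PySem.Int.toChars num)).length := by
    have : (pvEvI (PySem.Int.toChars num)).length = (pvEvC (PySem.Int.toChars num)).length := by
      simp [pvEvI, pvEvC]
    omega
  have hjO : (PySem.Int.toChars num).countP (fun c => !pvEven c)
      ≤ (pvOdI (PySem.Int.toChars num)).length := by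
    have : (pvOdI (PySem.Int.toChars num)).length = (pvOdC (PySem.Int.toChars num)).length := by
      simp [pvOdI, pvOdC]
    omega
  have hcnt := pvCntFold (PySem.Int.toChars num) hl (List.replicate 10 0) (by simp)
  set cnt0 := (PySem.Int.toChars num).foldl (fun cnt c =>
      PySem.List.pySetD cnt (pvCI c) (PySem.List.pyGetD cnt (pvCI c) 0 + 1))
      (List.replicate 10 (0 : Int)) with hcnt0def
  have h10 : cnt0.length = 10 := hcnt.1
  have hgetd : ∀ d : Nat, d < 10 → cnt0.getD d 0
      = ((PySem.Int.toChars num).countP (fun c => pvCI c == (d : Int)) : Int) := by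
    intro d hd
    have h := hcnt.2 d hd
    rw [PySem.List.pyGetD_natCast, PySem.List.pyGetD_natCast] at h
    rw [h, List.getD, List.getElem?_replicate, if_pos hd]
    simp
  have hnn0 : ∀ k : Nat, 0 ≤ cnt0.getD k 0 := by
    intro k
    by_cases hk : k < 10
    · rw [hgetd k hk]
      exact Int.natCast_nonneg _
    · rw [List.getD, List.getElem?_eq_none (by omega)]
      rfl
  have hEv : pvSeq cnt0 (pvChain 8 5) = pvEvI (PySem.Int.toChars num) := by
    rw [show pvChain 8 5 = [8, 6, 4, 2, 0] from by decide]
    simp only [pvSeq, List.flatMap_cons, List.flatMap_nil, List.append_nil]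
    rw [show ((8 : Int)).toNat = 8 from rfl, show ((6 : Int)).toNat = 6 from rfl,
      show ((4 : Int)).toNat = 4 from rfl, show ((2 : Int)).toNat = 2 from rfl,
      show ((0 : Int)).toNat = 0 from rfl,
      hgetd 8 (by omega), hgetd 6 (by omega), hgetd 4 (by omega),
      hgetd 2 (by omega), hgetd 0 (by omega)]
    simp [pvEvI, pvN]
  have hOd : pvSeq cnt0 (pvChain 9 5) = pvOdI (PySem.Int.toChars num) := by
    rw [show pvChain 9 5 = [9, 7, 5, 3, 1] from by decide]
    simp only [pvSeq, List.flatMap_cons, List.flatMap_nil, List.append_nil]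
    rw [show ((9 : Int)).toNat = 9 from rfl, show ((7 : Int)).toNat = 7 from rfl,
      show ((5 : Int)).toNat = 5 from rfl, show ((3 : Int)).toNat = 3 from rfl,
      show ((1 : Int)).toNat = 1 from rfl,
      hgetd 9 (by omega), hgetd 7 (by omega), hgetd 5 (by omega),
      hgetd 3 (by omega), hgetd 1 (by omega)]
    simp [pvOdI, pvN]
  have hinvE : pvInv cnt0 8 8 := ⟨[], 5, le_refl _, by simp, by simp⟩
  have hinvO : pvInv cnt0 9 9 := ⟨[], 5, le_refl _, by simp, by simp⟩
  have hB : largestInteger_alt num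
      = (PySem.Int.ofChars? (((pvBuild (PySem.Int.toChars num)
          (pvEvI (PySem.Int.toChars num)) (pvOdI (PySem.Int.toChars num))).map
            PySem.Int.toChars).flatten)).getD 0 := by
    simp only [largestInteger_alt, PySem.List.pyRepeat_singleton,
      show ((10 : Int).toNat = 10) from rfl]
    rw [← hcnt0def]
    rw [pvMainLoop (PySem.Int.toChars num) cnt0 8 9 [] h10 hnn0 hinvE hinvO
      (by rw [hEv]; exact hiE) (by rw [hOd]; exact hjO)]
    rw [hEv, hOd]
    simp
  -- ----- both sides reduce to the same digit string -----
  rw [hA, hB]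
  have hvals : ∀ x ∈ pvBuild (PySem.Int.toChars num)
      (pvEvI (PySem.Int.toChars num)) (pvOdI (PySem.Int.toChars num)), 0 ≤ x ∧ x < 10 := by
    intro x hx
    rcases pvBuild_mem _ _ _ hiE hjO x hx with h | h
    · simp [pvEvI, List.mem_append, List.mem_replicate] at h
      omega
    · simp [pvOdI, List.mem_append, List.mem_replicate] at h
      omega
  rw [pvFlattenDigits _ hvals,
    ← pvBuild_map pvChr _ _ _ (by simpa using hiE) (by simpa using hjO)]
  have hmapE : (pvEvI (PySem.Int.toChars num)).map pvChr = pvEvC (PySem.Int.toChars num) := by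
    simp [pvEvI, pvEvC, List.map_replicate,
      show pvChr 8 = '8' from by decide, show pvChr 6 = '6' from by decide,
      show pvChr 4 = '4' from by decide, show pvChr 2 = '2' from by decide,
      show pvChr 0 = '0' from by decide]
  have hmapO : (pvOdI (PySem.Int.toChars num)).map pvChr = pvOdC (PySem.Int.toChars num) := by
    simp [pvOdI, pvOdC, List.map_replicate,
      show pvChr 9 = '9' from by decide, show pvChr 7 = '7' from by decide,
      show pvChr 5 = '5' from by decide, show pvChr 3 = '3' from by decide,
      show pvChr 1 = '1' from by decide]
  rw [hmapE, hmapO]
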